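-- pv_equiv track=rewrite | github.com/Croydon/pt-recap | recap/calculation.py | biggest_decrease
-- ===== SOURCE A (Python) =====
-- def biggest_decrease(numbers: list):
--     former_users = None
--     biggest_decrease = 0
--     for day in numbers:
--         if not former_users:
--             former_users = day
--         else:
--             change_to_last_day = (former_users - day)
--             if change_to_last_day > biggest_decrease:
--                 biggest_decrease = change_to_last_day
--     return biggest_decrease
-- ===== SOURCE B (Python) =====
-- def biggest_decrease(numbers: list):
--     anchor = None
--     rest = []
--     for i, v in enumerate(numbers):
--         if v:
--             anchor = v
--             rest = numbers[i + 1:]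
--             break
--     if anchor is None or not rest:
--         return 0
--     return max(0, anchor - min(rest))
-- ===== Notes on version B (the rewrite author's own statement) =====
-- stated objective: simpler
-- what changed: Replaces the running-max state loop (optional anchor + best-so-far updated per element) with an anchor search for the first truthy element followed by a min() reduction over the tail and the closed form max(0, anchor - min(rest)).
import Mathlib
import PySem

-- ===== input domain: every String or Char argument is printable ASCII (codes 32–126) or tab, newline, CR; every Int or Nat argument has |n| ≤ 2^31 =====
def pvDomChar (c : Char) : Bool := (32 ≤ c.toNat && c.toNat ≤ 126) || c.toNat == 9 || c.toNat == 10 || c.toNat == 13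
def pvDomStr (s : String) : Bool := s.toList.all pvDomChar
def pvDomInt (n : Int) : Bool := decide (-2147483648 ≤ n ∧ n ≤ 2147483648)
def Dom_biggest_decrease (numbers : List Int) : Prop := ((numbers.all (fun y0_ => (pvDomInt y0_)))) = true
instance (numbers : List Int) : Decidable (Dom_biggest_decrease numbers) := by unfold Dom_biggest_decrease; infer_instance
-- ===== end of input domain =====

-- B replaces A's running-max state loop by an anchor search plus a min() reduction and a
-- closed-form max(0, anchor - min(rest)); objective: simpler. Both are total; no Pre_.

-- ===== PORT A =====
-- state = (former_users : Option Int, biggest_decrease : Int); 'not former_users' = None or 0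
def bdStep (st : Option Int × Int) (day : Int) : Option Int × Int :=
  if st.1 = none ∨ st.1 = some 0 then (some day, st.2)
  else
    let change_to_last_day := st.1.getD 0 - day
    if change_to_last_day > st.2 then (st.1, change_to_last_day) else (st.1, st.2)

def biggest_decrease (numbers : List Int) : Int :=
  (numbers.foldl bdStep (none, 0)).2

-- ===== PORT B =====
-- Source B's anchor loop: first truthy element and the slice after it
def bdFindAnchor : List Int → Option (Int × List Int)
  | [] => none
  | v :: t => if v ≠ 0 then some (v, t) else bdFindAnchor t

def biggest_decrease_alt (numbers : List Int) : Int :=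
  match bdFindAnchor numbers with
  | none => 0
  | some (anchor, rest) =>
    match PySem.List.min? rest (fun y => y) with
    | none => 0
    | some m => max 0 (anchor - m)

-- ===== PRECONDITION & SPEC =====
def Spec_biggest_decrease (numbers : List Int) (out : Int) : Prop := out = biggest_decrease_alt numbers
instance (numbers : List Int) (out : Int) : Decidable (Spec_biggest_decrease numbers out) := by unfold Spec_biggest_decrease; infer_instance

-- ===== CLAIM (what is proved, stated in full; the proofs are below) =====
def Claim_equal_biggest_decrease : Prop := ∀ (numbers : List Int), Dom_biggest_decrease numbers → Spec_biggest_decrease numbers (biggest_decrease numbers)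

-- ===== LEMMAS AND PROOFS =====

-- after the anchor a ≠ 0 is fixed, A's loop is a running max of (a - day)
theorem bd_loop_anchor (a : Int) (ha : a ≠ 0) :
    ∀ (xs : List Int) (b : Int),
      (xs.foldl bdStep (some a, b)).2 = xs.foldl (fun acc d => max acc (a - d)) b := by
  intro xs
  induction xs with
  | nil => intro b; rfl
  | cons d t ih =>
    intro b
    simp only [List.foldl_cons]
    have hstep : bdStep (some a, b) d = (some a, max b (a - d)) := by
      simp only [bdStep]
      have : ¬((some a : Option Int) = none ∨ (some a : Option Int) = some 0) := by
        simp [ha]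
      rw [if_neg this]
      simp only [Option.getD_some]
      split_ifs with h <;> simp <;> omega
    rw [hstep, ih]

-- fold of min pulls the head out
theorem foldl_min_pull (x : Int) : ∀ (t : List Int) (y : Int),
    t.foldl min (min x y) = min x (t.foldl min y) := by
  intro t
  induction t with
  | nil => intro y; rfl
  | cons z t ih =>
    intro y
    simp only [List.foldl_cons]
    rw [min_assoc, ih]

-- running max of (a - d) over a nonempty list = max b (a - min of the list)
theorem foldl_max_sub (a : Int) : ∀ (t : List Int) (x b : Int),
    (x :: t).foldl (fun acc d => max acc (a - d)) b = max b (a - t.foldl min x) := by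
  intro t
  induction t with
  | nil => intro x b; simp
  | cons y t ih =>
    intro x b
    have h1 : (x :: y :: t).foldl (fun acc d => max acc (a - d)) b
        = (y :: t).foldl (fun acc d => max acc (a - d)) (max b (a - x)) := by
      simp [List.foldl_cons]
    rw [h1, ih]
    have h2 : (y :: t).foldl min x = min x (t.foldl min y) := by
      simp only [List.foldl_cons]; rw [foldl_min_pull]
    rw [h2]
    omega

-- when the head is falsy (0), A's state (some 0) behaves exactly like the initial None state
theorem bd_loop_zero (xs : List Int) (b : Int) :
    (xs.foldl bdStep (some 0, b)).2 = (xs.foldl bdStep (none, b)).2 := by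
  cases xs with
  | nil => rfl
  | cons d t =>
    simp only [List.foldl_cons]
    have h1 : bdStep (some 0, b) d = (some d, b) := by simp [bdStep]
    have h2 : bdStep (none, b) d = (some d, b) := by simp [bdStep]
    rw [h1, h2]

theorem bd_main (numbers : List Int) : biggest_decrease numbers = biggest_decrease_alt numbers := by
  induction numbers with
  | nil => rfl
  | cons v t ih =>
    by_cases hv : v = 0
    · subst hv
      show (List.foldl bdStep (bdStep (none, 0) 0) t).2 = _
      have : bdStep (none, 0) 0 = (some 0, 0) := by simp [bdStep]
      rw [this, bd_loop_zero]
      have halt : biggest_decrease_alt ((0 : Int) :: t) = biggest_decrease_alt t := by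
        simp [biggest_decrease_alt, bdFindAnchor]
      rw [halt]
      exact ih
    · show (List.foldl bdStep (bdStep (none, 0) v) t).2 = _
      have : bdStep (none, 0) v = (some v, 0) := by simp [bdStep]
      rw [this, bd_loop_anchor v hv]
      simp only [biggest_decrease_alt, bdFindAnchor, if_pos hv]
      cases t with
      | nil => rfl
      | cons x t' =>
        rw [PySem.List.min?_id_cons]
        exact foldl_max_sub v t' x 0

-- ===== VERDICT (by name: the statement is the Claim_ definition above) =====
theorem biggest_decrease_spec : Claim_equal_biggest_decrease := by
  intro numbers _
  exact bd_main numbers
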